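-- pv_equiv track=rewrite | github.com/taeyang2/flow_track | graph_builder.py | select_session_id
-- ===== SOURCE A (Python) =====
-- def select_session_id(records, session_id=None):
--     session_ids = [record.get("session_id") for record in records if record.get("session_id")]
--     if not session_ids:
--         raise ValueError("No session_id found in tasks log.")
--
--     if session_id:
--         if session_id not in session_ids:
--             raise ValueError(f"Session not found: {session_id}")
--         return session_id
--
--     return max(session_ids)
-- ===== SOURCE B (Python) =====
-- def select_session_id(records, session_id=None):
--     ids = sorted(r.get("session_id") for r in records if r.get("session_id"))
--     if not ids:
--         raise ValueError("No session_id found in tasks log.")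
--     if not session_id:
--         return ids[-1]
--     # hand-rolled bisect_left (binary search) on the sorted id list
--     lo, hi = 0, len(ids)
--     while lo < hi:
--         mid = (lo + hi) // 2
--         if ids[mid] < session_id:
--             lo = mid + 1
--         else:
--             hi = mid
--     if lo < len(ids) and ids[lo] == session_id:
--         return session_id
--     raise ValueError(f"Session not found: {session_id}")
-- ===== Notes on version B (the rewrite author's own statement) =====
-- stated objective: alternative
-- what changed: A scans the collected id list linearly three times (emptiness, `in` membership, max); B sorts the ids once and then answers both questions from the sorted order: max is the last element and membership is a hand-rolled binary search.
import Mathlib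
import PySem

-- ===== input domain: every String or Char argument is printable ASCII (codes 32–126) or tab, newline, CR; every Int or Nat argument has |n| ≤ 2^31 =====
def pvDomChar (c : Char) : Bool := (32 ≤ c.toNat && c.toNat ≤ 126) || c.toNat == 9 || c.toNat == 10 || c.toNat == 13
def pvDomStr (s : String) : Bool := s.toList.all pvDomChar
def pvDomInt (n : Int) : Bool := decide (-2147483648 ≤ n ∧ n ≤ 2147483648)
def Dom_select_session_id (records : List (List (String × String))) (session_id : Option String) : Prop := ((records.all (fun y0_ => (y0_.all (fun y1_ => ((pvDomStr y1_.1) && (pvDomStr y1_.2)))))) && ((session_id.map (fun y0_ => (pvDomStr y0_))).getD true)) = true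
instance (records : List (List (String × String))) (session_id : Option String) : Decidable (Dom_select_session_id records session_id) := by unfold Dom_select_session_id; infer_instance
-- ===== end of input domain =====

-- B replaces A's three linear scans of the collected id list (emptiness, `in`, max) by
-- sorting the ids once and reading both answers off the sorted order: max = last element,
-- membership = hand-rolled binary search (objective: alternative, O(n log n) vs O(n)).

-- ===== PORT A =====
-- record.get("session_id")
def pvSidOf (r : List (String × String)) : Option String :=
  (PySem.Dict.ofList r).get? "session_id"

-- the comprehension [record.get("session_id") for record in records if record.get("session_id")]
-- (shared by both ports: B's generator expression is the same filter)
def pvSessionIds (records : List (List (String × String))) : List String :=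
  records.filterMap (fun r =>
    match pvSidOf r with
    | some s => if s = "" then none else some s
    | none => none)

def select_session_id (records : List (List (String × String))) (session_id : Option String) : String :=
  let session_ids := pvSessionIds records
  if session_ids = [] then ""  -- Python: raise ValueError("No session_id found in tasks log.") — excluded by Pre_
  else
    match session_id with
    | some sid =>
        if sid ≠ "" then  -- Python: `if session_id:` truthy branch
          if session_ids.contains sid then sid
          else ""  -- Python: raise ValueError(f"Session not found: {session_id}") — excluded by Pre_
        else (PySem.List.max? session_ids (fun x => x)).getD ""
    | none => (PySem.List.max? session_ids (fun x => x)).getD ""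

-- ===== PORT B =====
-- the while-loop: lo, hi are Python ints that provably stay in [0, len(ids)], so Nat with
-- Nat division is exact for `mid = (lo + hi) // 2`; ids[mid] is in range inside the loop.
def pvBsearch (ids : List String) (t : String) (lo hi : Nat) : Nat :=
  if lo < hi then
    let mid := (lo + hi) / 2
    if ids.getD mid "" < t then pvBsearch ids t (mid + 1) hi
    else pvBsearch ids t lo mid
  else lo
termination_by hi - lo
decreasing_by all_goals omega

def select_session_id_alt (records : List (List (String × String))) (session_id : Option String) : String :=
  let ids := PySem.List.sorted (pvSessionIds records) (fun x => x) false
  if ids = [] then ""  -- Python: raise ValueError("No session_id found in tasks log.") — excluded by Pre_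
  else
    match session_id with
    | none => PySem.List.pyGetD ids (-1) ""  -- `if not session_id: return ids[-1]`
    | some t =>
        if t = "" then PySem.List.pyGetD ids (-1) ""
        else
          let lo := pvBsearch ids t 0 ids.length
          if lo < ids.length ∧ ids.getD lo "" = t then t
          else ""  -- Python: raise ValueError(f"Session not found: {session_id}") — excluded by Pre_

-- ===== PRECONDITION & SPEC =====
-- Pre_ excludes exactly the inputs on which A raises ValueError: no record with a truthy
-- "session_id", or a truthy given session_id that is not among the collected ids.
def Pre_select_session_id (records : List (List (String × String))) (session_id : Option String) : Prop :=
  pvSessionIds records ≠ [] ∧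
  (∀ t, session_id = some t → t ≠ "" → t ∈ pvSessionIds records)

instance (records : List (List (String × String))) (session_id : Option String) : Decidable (Pre_select_session_id records session_id) := by unfold Pre_select_session_id; infer_instance

def pvWitness_select_session_id : (List (List (String × String))) × Option String :=
  ([[("session_id", "abc")], [("session_id", "xyz")]], some "abc")

def Spec_select_session_id (records : List (List (String × String))) (session_id : Option String) (out : String) : Prop := out = select_session_id_alt records session_id
instance (records : List (List (String × String))) (session_id : Option String) (out : String) : Decidable (Spec_select_session_id records session_id out) := by unfold Spec_select_session_id; infer_instance

-- ===== CLAIM (what is proved, stated in full; the proofs are below) =====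
def Claim_equal_select_session_id : Prop := ∀ (records : List (List (String × String))) (session_id : Option String), Dom_select_session_id records session_id → Pre_select_session_id records session_id → Spec_select_session_id records session_id (select_session_id records session_id)

-- ===== LEMMAS AND PROOFS =====

theorem pvSorted_last_eq_max (sids : List String) (hne : sids ≠ []) :
    PySem.List.pyGetD (PySem.List.sorted sids (fun x => x) false) (-1) "" =
      (PySem.List.max? sids (fun x => x)).getD "" := by
  have hLne : PySem.List.sorted sids (fun x => x) false ≠ [] := by
    intro h; exact hne ((PySem.List.sorted_eq_nil_iff sids _ false).mp h)
  set L := PySem.List.sorted sids (fun x => x) false with hL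
  rw [PySem.List.pyGetD_neg_one L "" hLne]
  obtain ⟨x, tl, rfl⟩ := List.exists_cons_of_ne_nil hne
  rw [PySem.List.max?_id_cons]
  show L.getLast hLne = List.foldl max x tl
  have hlast_mem : L.getLast hLne ∈ x :: tl := by
    rw [← PySem.List.mem_sorted (x :: tl) (fun x => x) false]
    exact List.getLast_mem hLne
  have hm_mem : List.foldl max x tl ∈ x :: tl := by
    rcases PySem.List.foldl_max_mem tl x with h | h
    · rw [h]; exact List.mem_cons_self
    · exact List.mem_cons_of_mem _ h
  apply le_antisymm
  · -- last ≤ max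
    rcases List.mem_cons.mp hlast_mem with h | h
    · rw [h]; exact (PySem.List.le_foldl_max tl x).1
    · exact (PySem.List.le_foldl_max tl x).2 _ h
  · -- max ≤ last
    have hm_memL : List.foldl max x tl ∈ L := by
      rw [hL, PySem.List.mem_sorted]; exact hm_mem
    obtain ⟨i, hi, hIe⟩ := List.getElem_of_mem hm_memL
    rw [List.getLast_eq_getElem, ← hIe]
    exact PySem.List.sorted_id_getElem_mono (x :: tl) (by omega)
      (by rw [← hL]; exact Nat.sub_lt (List.length_pos_of_ne_nil hLne) one_pos)

theorem pvBsearch_post (L : List String) (t : String)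
    (hmono : ∀ p q : Nat, p ≤ q → q < L.length → L.getD p "" ≤ L.getD q "") :
    ∀ (n lo hi : Nat), hi - lo = n → lo ≤ hi → hi ≤ L.length →
    (∀ i, i < lo → L.getD i "" < t) →
    (∀ i, hi ≤ i → i < L.length → ¬ L.getD i "" < t) →
    lo ≤ pvBsearch L t lo hi ∧ pvBsearch L t lo hi ≤ hi ∧
      (∀ i, i < pvBsearch L t lo hi → L.getD i "" < t) ∧
      (∀ i, pvBsearch L t lo hi ≤ i → i < L.length → ¬ L.getD i "" < t) := by
  intro n
  induction n using Nat.strong_induction_on with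
  | _ n ih =>
    intro lo hi hn hlh hhL hlow hhigh
    rw [pvBsearch]
    by_cases h : lo < hi
    · rw [if_pos h]
      simp only
      set mid := (lo + hi) / 2 with hmid
      have hml : lo ≤ mid := by omega
      have hmh : mid < hi := by omega
      by_cases hc : L.getD mid "" < t
      · rw [if_pos hc]
        have hres := ih (hi - (mid + 1)) (by omega) (mid + 1) hi rfl (by omega) hhL
          (fun i hiu => by
            by_cases hil : i < lo
            · exact hlow i hil
            · exact lt_of_le_of_lt (hmono i mid (by omega) (by omega)) hc)
          hhigh
        exact ⟨by omega, hres.2.1, hres.2.2⟩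
      · rw [if_neg hc]
        have hres := ih (mid - lo) (by omega) lo mid rfl (by omega) (by omega) hlow
          (fun i hmi hiL => fun hlt =>
            hc (lt_of_le_of_lt (hmono mid i hmi hiL) hlt))
        exact ⟨hres.1, by omega, hres.2.2⟩
    · rw [if_neg h]
      exact ⟨le_refl _, by omega, hlow, fun i hli => hhigh i (by omega)⟩

theorem pvBsearch_finds (sids : List String) (t : String)
    (hmem : t ∈ PySem.List.sorted sids (fun x => x) false) :
    pvBsearch (PySem.List.sorted sids (fun x => x) false) t 0
        (PySem.List.sorted sids (fun x => x) false).length <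
      (PySem.List.sorted sids (fun x => x) false).length ∧
    (PySem.List.sorted sids (fun x => x) false).getD
        (pvBsearch (PySem.List.sorted sids (fun x => x) false) t 0
          (PySem.List.sorted sids (fun x => x) false).length) "" = t := by
  set L := PySem.List.sorted sids (fun x => x) false with hL
  have hmono : ∀ p q : Nat, p ≤ q → q < L.length → L.getD p "" ≤ L.getD q "" := by
    intro p q hpq hq
    rw [List.getD_eq_getElem L "" (by omega), List.getD_eq_getElem L "" hq]
    have := PySem.List.sorted_id_getElem_mono sids hpq (p := p) (by rw [← hL]; exact hq)
    simpa [← hL] using this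
  have hpost := pvBsearch_post L t hmono L.length 0 L.length rfl (by omega) (le_refl _)
    (fun i hi => absurd hi (Nat.not_lt_zero i))
    (fun i hi hiL => absurd hiL (by omega))
  obtain ⟨i, hi, hIe⟩ := List.getElem_of_mem hmem
  set r := pvBsearch L t 0 L.length with hr
  obtain ⟨-, hrle, hbelow, habove⟩ := hpost
  have hir : ¬ i < r := fun hlt => by
    have := hbelow i hlt
    rw [List.getD_eq_getElem L "" hi, hIe] at this
    exact lt_irrefl t this
  have hrlen : r < L.length := by omega
  have h1 : ¬ L.getD r "" < t := habove r (le_refl _) hrlen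
  have h2 : L.getD r "" ≤ t := by
    have := hmono r i (by omega) hi
    rwa [List.getD_eq_getElem L "" hi, hIe] at this
  exact ⟨hrlen, le_antisymm h2 (not_lt.mp h1)⟩

-- ===== VERDICT (by name: the statement is the Claim_ definition above) =====
theorem select_session_id_spec : Claim_equal_select_session_id := by
  intro records session_id _ hpre
  obtain ⟨hne, hmem⟩ := hpre
  unfold Spec_select_session_id select_session_id select_session_id_alt
  simp only
  have hLne : PySem.List.sorted (pvSessionIds records) (fun x => x) false ≠ [] := by
    intro h; exact hne ((PySem.List.sorted_eq_nil_iff _ _ false).mp h)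
  rw [if_neg hne, if_neg hLne]
  cases session_id with
  | none => exact (pvSorted_last_eq_max (pvSessionIds records) hne).symm
  | some t =>
      by_cases ht : t = ""
      · simp only [ht, ne_eq, not_true_eq_false, if_false]
        exact (pvSorted_last_eq_max (pvSessionIds records) hne).symm
      · have htmem : t ∈ pvSessionIds records := hmem t rfl ht
        have htL : t ∈ PySem.List.sorted (pvSessionIds records) (fun x => x) false :=
          (PySem.List.mem_sorted _ _ false t).mpr htmem
        have hfind := pvBsearch_finds (pvSessionIds records) t htL
        have hcont : (pvSessionIds records).contains t = true := by simpa using htmem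
        simp only [ne_eq, ht, not_false_eq_true, if_true]
        rw [if_pos hcont, if_pos hfind]
        simp
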